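-- pv_equiv track=rewrite | github.com/handcraftsman/TreeBasedMachineLearningAlgorithms | ch03/dtree.py | _generate_discontinuity_indexes_center_out
-- ===== SOURCE A (Python) =====
-- def _generate_discontinuity_indexes_center_out(sortedAttrValues):
--     center = len(sortedAttrValues) // 2
--     left = center - 1
--     right = center + 1
--     while left >= 0 or right < len(sortedAttrValues):
--         if left >= 0:
--             if sortedAttrValues[left] != sortedAttrValues[left + 1]:
--                 yield left
--             left -= 1
--         if right < len(sortedAttrValues):
--             if sortedAttrValues[right - 1] != sortedAttrValues[right]:
--                 yield right - 1
--             right += 1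
-- ===== SOURCE B (Python) =====
-- def _generate_discontinuity_indexes_center_out(sortedAttrValues):
--     n = len(sortedAttrValues)
--     center = n // 2
--     diffs = [i for i in range(n - 1)
--              if sortedAttrValues[i] != sortedAttrValues[i + 1]]
--     diffs.sort(key=lambda i: 2 * (center - 1 - i) if i < center
--                              else 2 * (i - center) + 1)
--     yield from diffs
-- ===== Notes on version B (the rewrite author's own statement) =====
-- stated objective: alternative
-- what changed: replaces A's stateful two-pointer while-loop generator with a one-pass filter collecting all adjacent-difference indexes followed by a stable sort under a center-out distance key
import Mathlib
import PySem

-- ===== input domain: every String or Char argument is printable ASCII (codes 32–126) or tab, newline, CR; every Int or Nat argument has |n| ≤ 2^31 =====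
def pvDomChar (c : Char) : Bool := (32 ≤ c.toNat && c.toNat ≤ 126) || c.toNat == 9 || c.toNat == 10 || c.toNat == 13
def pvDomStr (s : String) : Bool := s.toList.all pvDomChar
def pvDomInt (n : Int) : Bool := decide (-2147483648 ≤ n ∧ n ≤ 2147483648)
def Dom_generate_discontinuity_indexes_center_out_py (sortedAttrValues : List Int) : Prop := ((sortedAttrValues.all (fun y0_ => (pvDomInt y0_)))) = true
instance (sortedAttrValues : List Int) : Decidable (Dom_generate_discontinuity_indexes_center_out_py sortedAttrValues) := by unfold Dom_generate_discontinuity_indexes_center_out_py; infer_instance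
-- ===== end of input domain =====

-- B replaces A's two-pointer generator loop by a single filter pass followed by a
-- stable key-sort into the same center-out order (objective: alternative decomposition).

-- ===== PORT A =====
-- shared helper: the adjacent-difference test 'sortedAttrValues[i] != sortedAttrValues[i+1]'
def pvDiff (xs : List Int) (i : Int) : Bool :=
  PySem.List.pyGetD xs i 0 != PySem.List.pyGetD xs (i + 1) 0
-- all indexings of the Python are guarded and in range, so pyGetD with default 0 is exact

-- the while loop of A, state (left, right); yields in the Python's order.
-- fuel is only a structural-termination guard: xs.length bounds the iteration count
def pvALoop (xs : List Int) (fuel : Nat) (left right : Int) : List Int :=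
  match fuel with
  | 0 => []
  | f + 1 =>
    if 0 ≤ left ∨ right < PySem.List.len xs then
      (if 0 ≤ left ∧ pvDiff xs left = true then [left] else [])
      ++ (if right < PySem.List.len xs ∧ pvDiff xs (right - 1) = true then [right - 1] else [])
      ++ pvALoop xs f (if 0 ≤ left then left - 1 else left)
                      (if right < PySem.List.len xs then right + 1 else right)
    else []

def generate_discontinuity_indexes_center_out_py (sortedAttrValues : List Int) : List Int :=
  let center := PySem.Int.floordiv (PySem.List.len sortedAttrValues) 2
  pvALoop sortedAttrValues sortedAttrValues.length (center - 1) (center + 1)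

-- ===== PORT B =====
-- the sort key of Source B: step distance from the center, left of center before right
def pvKey (center i : Int) : Int :=
  if i < center then 2 * (center - 1 - i) else 2 * (i - center) + 1

def generate_discontinuity_indexes_center_out_py_alt (sortedAttrValues : List Int) : List Int :=
  let n := PySem.List.len sortedAttrValues
  let center := PySem.Int.floordiv n 2
  let diffs := (PySem.List.pyRange 0 (n - 1) 1).filter (fun i => pvDiff sortedAttrValues i)
  PySem.List.sorted diffs (fun i => pvKey center i) false

-- ===== PRECONDITION & SPEC =====
def Spec_generate_discontinuity_indexes_center_out_py (sortedAttrValues : List Int) (out : List Int) : Prop := out = generate_discontinuity_indexes_center_out_py_alt sortedAttrValues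
instance (sortedAttrValues : List Int) (out : List Int) : Decidable (Spec_generate_discontinuity_indexes_center_out_py sortedAttrValues out) := by unfold Spec_generate_discontinuity_indexes_center_out_py; infer_instance

-- ===== CLAIM (what is proved, stated in full; the proofs are below) =====
def Claim_equal_generate_discontinuity_indexes_center_out_py : Prop := ∀ (sortedAttrValues : List Int), Dom_generate_discontinuity_indexes_center_out_py sortedAttrValues → Spec_generate_discontinuity_indexes_center_out_py sortedAttrValues (generate_discontinuity_indexes_center_out_py sortedAttrValues)

-- ===== LEMMAS AND PROOFS =====

-- len_eq restated with the cast form used throughout this file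
theorem pvLen_eq (xs : List Int) : PySem.List.len xs = (xs.length : Int) := PySem.List.len_eq xs

-- invariant lemma: bounds, strict key-sortedness and multiset content of A's loop output
theorem pvALoop_props (xs : List Int) (c : Int)
    (hc : 2 * c ≤ (xs.length : Int) ∧ (xs.length : Int) ≤ 2 * c + 1) (fuel : Nat) :
    ∀ (left right : Int), left ≤ c - 1 → c + 1 ≤ right →
    (left < 0 ∨ (xs.length : Int) ≤ right ∨ left + right = 2 * c) →
    ((left + 1).toNat ≤ fuel ∧ ((xs.length : Int) - right).toNat ≤ fuel) →
    (∀ i ∈ pvALoop xs fuel left right,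
        (0 ≤ i ∧ i ≤ left) ∨ (right - 1 ≤ i ∧ i ≤ (xs.length : Int) - 2)) ∧
    List.Pairwise (fun a b => pvKey c a < pvKey c b) (pvALoop xs fuel left right) ∧
    (pvALoop xs fuel left right).Perm
      ((PySem.List.pyRange 0 (left + 1) 1 ++ PySem.List.pyRange (right - 1) ((xs.length : Int) - 1) 1).filter
        (fun i => pvDiff xs i)) := by
  induction fuel with
  | zero =>
    intro left right hl hr hinv hfuel
    have h1 : PySem.List.pyRange 0 (left + 1) 1 = [] :=
      PySem.List.pyRange_one_eq_nil (by omega)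
    have h2 : PySem.List.pyRange (right - 1) ((xs.length : Int) - 1) 1 = [] :=
      PySem.List.pyRange_one_eq_nil (by omega)
    refine ⟨by simp [pvALoop], by simp [pvALoop], ?_⟩
    simp [pvALoop, h1, h2]
  | succ f ih =>
    intro left right hl hr hinv hfuel
    show _ ∧ _ ∧ (pvALoop xs (f + 1) left right).Perm _
    rw [pvALoop]
    simp only [pvLen_eq]
    by_cases hcond : 0 ≤ left ∨ right < (xs.length : Int)
    · rw [if_pos hcond]
      set n : Int := (xs.length : Int) with hn
      set l2 := (if 0 ≤ left then left - 1 else left) with hl2def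
      set r2 := (if right < n then right + 1 else right) with hr2def
      have hl2 : (0 ≤ left ∧ l2 = left - 1) ∨ (left < 0 ∧ l2 = left) := by
        by_cases h : 0 ≤ left
        · exact Or.inl ⟨h, by rw [hl2def, if_pos h]⟩
        · exact Or.inr ⟨by omega, by rw [hl2def, if_neg h]⟩
      have hr2 : (right < n ∧ r2 = right + 1) ∨ (n ≤ right ∧ r2 = right) := by
        by_cases h : right < n
        · exact Or.inl ⟨h, by rw [hr2def, if_pos h]⟩
        · exact Or.inr ⟨by omega, by rw [hr2def, if_neg h]⟩
      obtain ⟨IHmem, IHpair, IHperm⟩ := ih l2 r2 (by omega) (by omega) (by omega) (by omega)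
      set O1 := (if 0 ≤ left ∧ pvDiff xs left = true then [left] else []) with hO1
      set O2 := (if right < n ∧ pvDiff xs (right - 1) = true then [right - 1] else []) with hO2
      set rec := pvALoop xs f l2 r2 with hrec
      have mO1 : ∀ a ∈ O1, a = left ∧ 0 ≤ left := by
        intro a ha; rw [hO1] at ha; split_ifs at ha with h
        · simp at ha; exact ⟨ha, h.1⟩
        · simp at ha
      have mO2 : ∀ a ∈ O2, a = right - 1 ∧ right < n := by
        intro a ha; rw [hO2] at ha; split_ifs at ha with h
        · simp at ha; exact ⟨ha, h.1⟩
        · simp at ha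
      refine ⟨?_, ?_, ?_⟩
      · -- membership bounds
        intro i hi
        rcases List.mem_append.mp hi with hi' | hi'
        · rcases List.mem_append.mp hi' with h2 | h2
          · rcases mO1 i h2 with ⟨rfl, h⟩; omega
          · rcases mO2 i h2 with ⟨rfl, h⟩; omega
        · rcases IHmem i hi' with h | h <;> omega
      · -- pairwise strict key order
        refine List.pairwise_append.mpr ⟨List.pairwise_append.mpr ⟨?_, ?_, ?_⟩, IHpair, ?_⟩
        · rw [hO1]; split_ifs <;> simp
        · rw [hO2]; split_ifs <;> simp
        · -- O1 before O2
          intro a ha b hb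
          rcases mO1 a ha with ⟨rfl, hL⟩
          rcases mO2 b hb with ⟨rfl, hRn⟩
          simp only [pvKey]; split_ifs <;> omega
        · -- O1 ++ O2 before rec
          intro a ha b hb
          have hbmem := IHmem b hb
          rcases List.mem_append.mp ha with h2 | h2
          · rcases mO1 a h2 with ⟨rfl, hL⟩
            rcases hbmem with h | h <;> (simp only [pvKey]; split_ifs <;> omega)
          · rcases mO2 a h2 with ⟨rfl, hRn⟩
            rcases hbmem with h | h <;> (simp only [pvKey]; split_ifs <;> omega)
      · -- permutation of content
        have hRL : (PySem.List.pyRange 0 (left + 1) 1).filter (fun i => pvDiff xs i)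
            = (PySem.List.pyRange 0 (l2 + 1) 1).filter (fun i => pvDiff xs i) ++ O1 := by
          rcases hl2 with ⟨hL, hE⟩ | ⟨hL, hE⟩
          · rw [PySem.List.pyRange_one_succ_right (by omega : (0:Int) ≤ left),
              List.filter_append, hE, hO1]
            cases hd : pvDiff xs left <;> simp [hd, hL]
          · rw [hE, hO1, if_neg (fun hco => absurd hco.1 (by omega))]
            simp
        have hRR : (PySem.List.pyRange (right - 1) (n - 1) 1).filter (fun i => pvDiff xs i)
            = O2 ++ (PySem.List.pyRange (r2 - 1) (n - 1) 1).filter (fun i => pvDiff xs i) := by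
          rcases hr2 with ⟨hR, hE⟩ | ⟨hR, hE⟩
          · rw [PySem.List.pyRange_one_cons (by omega : right - 1 < n - 1), hE,
              show right + 1 - 1 = right by omega, hO2]
            cases hd : pvDiff xs (right - 1) <;> simp [hd, hR]
          · have e1 : PySem.List.pyRange (right - 1) (n - 1) 1 = [] :=
              PySem.List.pyRange_one_eq_nil (by omega)
            have e2 : PySem.List.pyRange (r2 - 1) (n - 1) 1 = [] :=
              PySem.List.pyRange_one_eq_nil (by omega)
            rw [e1, e2, hO2, if_neg (fun hco => absurd hco.1 (by omega))]
            simp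
        rw [List.filter_append, hRL, hRR]
        rw [List.filter_append] at IHperm
        refine List.Perm.trans (List.Perm.append_left (O1 ++ O2) IHperm) ?_
        rw [List.perm_iff_count]
        intro a
        simp only [List.count_append]
        omega
    · rw [if_neg hcond]
      refine ⟨by simp, by simp, ?_⟩
      have h1 : PySem.List.pyRange 0 (left + 1) 1 = [] :=
        PySem.List.pyRange_one_eq_nil (by omega)
      have h2 : PySem.List.pyRange (right - 1) ((xs.length : Int) - 1) 1 = [] :=
        PySem.List.pyRange_one_eq_nil (by omega)
      simp [h1, h2]

-- ===== VERDICT (by name: the statement is the Claim_ definition above) =====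
theorem generate_discontinuity_indexes_center_out_py_spec : Claim_equal_generate_discontinuity_indexes_center_out_py := by
  intro xs _
  unfold Spec_generate_discontinuity_indexes_center_out_py
    generate_discontinuity_indexes_center_out_py
    generate_discontinuity_indexes_center_out_py_alt
  simp only [pvLen_eq]
  set n : Int := (xs.length : Int) with hn
  have hn0 : 0 ≤ n := by omega
  set c := PySem.Int.floordiv n 2 with hc
  have hcb : 2 * c ≤ n ∧ n ≤ 2 * c + 1 := by
    rw [hc, PySem.Int.floordiv_eq_ediv_of_pos (by omega)]
    omega
  obtain ⟨hmem, hpair, hperm⟩ := pvALoop_props xs c hcb xs.length (c - 1) (c + 1)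
    (by omega) (by omega) (by omega) (by omega)
  rw [← hn] at hperm
  rw [show c - 1 + 1 = c by omega, show c + 1 - 1 = c by omega] at hperm
  have hranges : PySem.List.pyRange 0 c 1 ++ PySem.List.pyRange c (n - 1) 1
      = PySem.List.pyRange 0 (n - 1) 1 := by
    by_cases h : n = 0
    · have hc0 : c = 0 := by
        rw [hc, PySem.Int.floordiv_eq_ediv_of_pos (by omega)]; omega
      rw [h, hc0]
      simp [PySem.List.pyRange_one_eq_nil]
    · exact (PySem.List.pyRange_one_append 0 c (n - 1) (by omega) (by omega)).symm
  rw [hranges] at hperm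
  exact (PySem.List.sorted_eq_of_perm_of_pairwise_lt _ _ _ hperm hpair).symm
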